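-- pv_equiv track=rewrite | github.com/pytearcat/pytearcat | pytearcat/tensor/lcivita.py | arePermsEqualParity
-- ===== SOURCE A (Python) =====
-- def arePermsEqualParity(perm0, perm1):
--     """Check if 2 permutations are of equal parity.
--
--     Assume that both permutation lists are of equal length
--     and have the same elements. No need to check for these
--     conditions.
--     """
--     perm1 = list(perm1) ## copy this into a list so we don't mutate the original
--     perm1_map = dict((v, i) for i,v in enumerate(perm1))
--     transCount = 0
--     for loc, p0 in enumerate(perm0):
--         p1 = perm1[loc]
--         if p0 != p1:
--             sloc = perm1_map[p0]                       # Find position in perm1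
--             perm1[loc], perm1[sloc] = p0, p1           # Swap in perm1
--             perm1_map[p0], perm1_map[p1] = loc, sloc   # Swap the map
--             transCount += 1
--     # Even number of transpositions means equal parity
--     value = (transCount % 2) == 0
--
--     if value:
--
--         return 1
--
--     else:
--
--         return -1
-- ===== SOURCE B (Python) =====
-- def arePermsEqualParity(perm0, perm1):
--     """B: parity via index-sum with removal: bring each element of perm0 to the
--     front of a shrinking copy of perm1; each index k costs k adjacent
--     transpositions, so total parity = parity of the sum of removal indices."""
--     rest = list(perm1)
--     inv = 0
--     for a in perm0:
--         k = rest.index(a)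
--         inv += k
--         rest.pop(k)
--     return 1 if inv % 2 == 0 else -1
-- ===== Notes on version B (the rewrite author's own statement) =====
-- stated objective: simpler
-- what changed: A repairs a mutable copy of perm1 toward perm0 with a value-to-index dict, swapping elements and map entries and counting transpositions; B instead walks perm0 once over a shrinking copy of perm1, summing each element's removal index (bringing an element to the front from index k costs k adjacent transpositions), and returns the parity of that sum - no dict, no swaps, no index bookkeeping.
-- outside the precondition, e.g. on arePermsEqualParity([2, 2, 1], [1, 2, 2]): A returns -1, B returns 1; on arePermsEqualParity([3], [1, 2, 3]): A returns -1, B returns 1; on arePermsEqualParity([1, 1], [2, 92, 2, 6, 4, 1]): A returns 1, B raises ValueError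
import Mathlib
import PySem

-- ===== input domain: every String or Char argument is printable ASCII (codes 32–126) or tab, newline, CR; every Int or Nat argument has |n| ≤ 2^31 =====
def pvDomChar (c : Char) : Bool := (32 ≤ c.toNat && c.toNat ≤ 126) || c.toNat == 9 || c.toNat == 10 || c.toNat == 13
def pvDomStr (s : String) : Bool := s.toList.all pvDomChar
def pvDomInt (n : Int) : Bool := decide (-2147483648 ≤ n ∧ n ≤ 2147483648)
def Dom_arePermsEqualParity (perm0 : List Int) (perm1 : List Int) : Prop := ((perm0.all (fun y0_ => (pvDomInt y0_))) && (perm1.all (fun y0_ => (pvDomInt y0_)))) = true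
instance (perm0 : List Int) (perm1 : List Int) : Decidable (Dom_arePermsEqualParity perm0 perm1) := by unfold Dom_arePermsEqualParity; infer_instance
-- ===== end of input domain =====

-- B replaces A's dict-and-swap transposition count by a removal-index parity sum: simpler, no dict.
-- Equivalence of the RETURN value is proved on genuine permutations (Pre_ below); A mutates nothing observable.

-- ===== PORT A =====
def arePermsEqualParity (perm0 : List Int) (perm1 : List Int) : Int :=
  -- perm1 = list(perm1); perm1_map = dict((v, i) for i, v in enumerate(perm1))
  let perm1a := perm1
  let perm1_map : PySem.Dict Int Int :=
    (PySem.List.enumerate perm1a).foldl (fun d iv => d.insert iv.2 iv.1) PySem.Dict.empty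
  -- for loc, p0 in enumerate(perm0): …
  let st :=
    (PySem.List.enumerate perm0).foldl
      (fun st iv =>
        let loc := iv.1
        let p0 := iv.2
        let p1 := (PySem.List.pyGet? st.1 loc).getD 0          -- perm1[loc]; in range under Pre_
        if p0 ≠ p1 then
          let sloc := st.2.1.getD p0 0                         -- perm1_map[p0]; key present under Pre_
          (PySem.List.pySetD (PySem.List.pySetD st.1 loc p0) sloc p1,
           (st.2.1.insert p0 loc).insert p1 sloc,
           st.2.2 + 1)
        else st)
      (perm1a, perm1_map, (0 : Int))
  if PySem.Int.mod st.2.2 2 = 0 then 1 else -1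

-- ===== PORT B =====
def arePermsEqualParity_alt (perm0 : List Int) (perm1 : List Int) : Int :=
  -- rest = list(perm1); for a in perm0: k = rest.index(a); inv += k; rest.pop(k)
  let st :=
    perm0.foldl
      (fun st a =>
        let k := (PySem.List.index? st.1 a).getD 0             -- rest.index(a); present under Pre_
        (((PySem.List.pop? st.1 (k : Int)).getD (0, st.1)).2, st.2 + (k : Int)))
      (perm1, (0 : Int))
  if PySem.Int.mod st.2 2 = 0 then 1 else -1

-- ===== PRECONDITION & SPEC =====
-- Pre_ admits genuine permutations of distinct elements (the docstring's stated assumption) plus the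
-- trivial pairs (perm0 equal to perm1, or perm0 empty), where both programs agree. It excludes pairs that
-- are not permutations of the same elements: on most of those A raises (KeyError/IndexError), and where it
-- still returns (a short or duplicate-heavy perm0 whose elements all occur in perm1) the value is an
-- accident of its partial prefix-alignment loop and last-index-wins dict (both cited values are defensible
-- corner readings; B reads first occurrences of a full permutation).
def Pre_arePermsEqualParity (perm0 : List Int) (perm1 : List Int) : Prop :=
  (perm1.Nodup ∧ perm0.Perm perm1) ∨ perm0 = perm1 ∨ perm0 = []
instance (perm0 : List Int) (perm1 : List Int) : Decidable (Pre_arePermsEqualParity perm0 perm1) := by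
  unfold Pre_arePermsEqualParity; infer_instance
def pvWitness_arePermsEqualParity : List Int × List Int := ([1, 2, 3], [2, 1, 3])
def Spec_arePermsEqualParity (perm0 : List Int) (perm1 : List Int) (out : Int) : Prop :=
  out = arePermsEqualParity_alt perm0 perm1
instance (perm0 : List Int) (perm1 : List Int) (out : Int) : Decidable (Spec_arePermsEqualParity perm0 perm1 out) := by
  unfold Spec_arePermsEqualParity; infer_instance

-- ===== CLAIM (what is proved, stated in full; the proofs are below) =====
def Claim_equal_arePermsEqualParity : Prop := ∀ (perm0 : List Int) (perm1 : List Int), Dom_arePermsEqualParity perm0 perm1 → Pre_arePermsEqualParity perm0 perm1 → Spec_arePermsEqualParity perm0 perm1 (arePermsEqualParity perm0 perm1)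

-- ===== LEMMAS AND PROOFS =====

lemma mem_decomp {l : List Int} {a : Int} (h : a ∈ l) :
    ∃ s t, l = s ++ a :: t ∧ a ∉ s ∧ l.idxOf a = s.length := by
  induction l with
  | nil => cases h
  | cons x xs ih =>
    by_cases hx : x = a
    · exact ⟨[], xs, by simp [hx], by simp, by simp [hx]⟩
    · rcases List.mem_cons.mp h with h' | h'
      · exact absurd h'.symm hx
      · rcases ih h' with ⟨s, t, rfl, hns, hidx⟩
        exact ⟨x :: s, t, rfl, by simp [hns]; exact fun e => hx (Eq.symm e),
          by simp [List.idxOf_cons_ne _ hx, hidx]⟩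

def invSum : List Int → List Int → Nat
  | [], _ => 0
  | a :: as, l => l.idxOf a + invSum as (l.eraseIdx (l.idxOf a))

lemma idxOf?_eq_some_of_mem {l : List Int} {a : Int} (h : a ∈ l) : l.idxOf? a = some (l.idxOf a) := by
  induction l with
  | nil => cases h
  | cons x xs ih =>
    by_cases hx : x = a
    · subst hx; simp [List.idxOf?_cons]
    · rcases List.mem_cons.mp h with h' | h'
      · exact absurd h'.symm hx
      · simp [List.idxOf?_cons, hx, ih h', beq_iff_eq]

lemma bLoop (u : List Int) : ∀ (r : List Int) (inv : Int), u.Perm r →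
    (u.foldl
      (fun st a =>
        let k := (PySem.List.index? st.1 a).getD 0
        (((PySem.List.pop? st.1 (k : Int)).getD (0, st.1)).2, st.2 + (k : Int)))
      (r, inv)).2 = inv + (invSum u r : Int) := by
  induction u with
  | nil => intro r inv _; simp [invSum]
  | cons a as ih =>
    intro r inv hp
    have ha : a ∈ r := hp.mem_iff.mp (List.mem_cons_self)
    have hk : r.idxOf a < r.length := List.idxOf_lt_length_of_mem ha
    have hidx : PySem.List.index? r a = some (r.idxOf a) := by
      rw [PySem.List.index?_eq_idxOf?]; exact idxOf?_eq_some_of_mem ha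
    have hpop : PySem.List.pop? r ((r.idxOf a : Nat) : Int)
        = some (r[r.idxOf a], r.eraseIdx (r.idxOf a)) := PySem.List.pop?_natCast r _ hk
    have hperm' : as.Perm (r.eraseIdx (r.idxOf a)) := by
      rw [← List.erase_eq_eraseIdx_of_idxOf rfl]
      exact (hp.trans (List.perm_cons_erase ha)).cons_inv
    simp only [List.foldl_cons, hidx, Option.getD_some, hpop]
    rw [ih _ _ hperm']
    simp [invSum]; ring

lemma buildMap_notMem (l : List Int) : ∀ (s : Int) (d : PySem.Dict Int Int) (v : Int), v ∉ l →
    ((PySem.List.enumerate l s).foldl (fun d iv => d.insert iv.2 iv.1) d).getD v 0 = d.getD v 0 := by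
  induction l with
  | nil => intro s d v _; simp [PySem.List.enumerate_nil]
  | cons x xs ih =>
    intro s d v hv
    rw [PySem.List.enumerate_cons, List.foldl_cons, ih (s+1) _ v (fun h => hv (List.mem_cons_of_mem _ h))]
    exact PySem.Dict.getD_insert_of_ne _ _ _ (fun e => hv (e ▸ List.mem_cons_self))

lemma buildMap (l : List Int) : ∀ (s : Int) (d : PySem.Dict Int Int) (v : Int), l.Nodup → v ∈ l →
    ((PySem.List.enumerate l s).foldl (fun d iv => d.insert iv.2 iv.1) d).getD v 0
      = s + (l.idxOf v : Int) := by
  induction l with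
  | nil => intro _ _ _ _ h; cases h
  | cons x xs ih =>
    intro s d v hnd hv
    rw [PySem.List.enumerate_cons, List.foldl_cons]
    by_cases hx : x = v
    · subst hx
      rw [buildMap_notMem xs (s+1) _ x (List.Nodup.notMem hnd)]
      simp [PySem.Dict.getD_insert_self]
    · rcases List.mem_cons.mp hv with h' | h'
      · exact absurd h'.symm hx
      · rw [ih (s+1) _ v (List.Nodup.of_cons hnd) h', List.idxOf_cons_ne _ hx]
        push_cast; ring

lemma idxOf_append_self {p t : List Int} {c : Int} (h : c ∉ p) : (p ++ c :: t).idxOf c = p.length := by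
  rw [List.idxOf_append_of_notMem h]; simp

lemma eraseIdx_append_self (p t : List Int) (c : Int) : (p ++ c :: t).eraseIdx p.length = p ++ t := by
  rw [List.eraseIdx_append_of_length_le (le_refl _)]; simp

lemma adjSwap (v : List Int) : ∀ (p s : List Int) (x y : Int),
    v.Perm (p ++ x :: y :: s) → (p ++ x :: y :: s).Nodup →
    (invSum v (p ++ x :: y :: s) + invSum v (p ++ y :: x :: s)) % 2 = 1 := by
  induction v with
  | nil =>
    intro p s x y hp _
    have := hp.nil_eq
    simp at this
  | cons c cs ih =>
    intro p s x y hp hnd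
    have hc : c ∈ p ++ x :: y :: s := hp.mem_iff.mp List.mem_cons_self
    have hnd2 : (x :: y :: s).Nodup := (List.nodup_append.mp hnd).2.1
    have hxy : x ≠ y := by
      intro e; subst e; simp at hnd2
    have hdisj := List.disjoint_of_nodup_append hnd
    have hxp : x ∉ p := fun hxph => hdisj hxph List.mem_cons_self
    have hyp : y ∉ p := fun hyph => hdisj hyph (List.mem_cons_of_mem _ List.mem_cons_self)
    rcases List.mem_append.mp hc with hcp | hcr
    · -- c sits in the common prefix p
      rcases mem_decomp hcp with ⟨p1, p2, rfl, hcp1, _⟩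
      simp only [List.append_assoc, List.cons_append] at hp hnd ⊢
      have e1 := idxOf_append_self (t := p2 ++ x :: y :: s) hcp1
      have e2 := idxOf_append_self (t := p2 ++ y :: x :: s) hcp1
      have r1 := eraseIdx_append_self p1 (p2 ++ x :: y :: s) c
      have r2 := eraseIdx_append_self p1 (p2 ++ y :: x :: s) c
      have hperm' : cs.Perm ((p1 ++ p2) ++ x :: y :: s) := by
        have := (hp.trans List.perm_middle).cons_inv
        simpa [List.append_assoc] using this
      have hnd' : ((p1 ++ p2) ++ x :: y :: s).Nodup := by
        have := (List.Perm.nodup List.perm_middle hnd).of_cons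
        simpa [List.append_assoc] using this
      have key := ih (p1 ++ p2) s x y hperm' hnd'
      simp only [List.append_assoc] at key
      simp only [invSum, e1, e2, r1, r2]
      omega
    · rcases List.mem_cons.mp hcr with rfl | hcr2
      · -- c = x
        have e1 : (p ++ c :: y :: s).idxOf c = p.length := idxOf_append_self hxp
        have e2 : (p ++ y :: c :: s).idxOf c = p.length + 1 := by
          rw [List.idxOf_append_of_notMem hxp, List.idxOf_cons_ne _ (Ne.symm hxy)]
          simp
        have r1 : (p ++ c :: y :: s).eraseIdx p.length = p ++ y :: s :=
          eraseIdx_append_self p (y :: s) c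
        have r2 : (p ++ y :: c :: s).eraseIdx (p.length + 1) = p ++ y :: s := by
          rw [List.eraseIdx_append_of_length_le (Nat.le_add_right _ _)]
          simp
        simp only [invSum, e1, e2, r1, r2]
        omega
      rcases List.mem_cons.mp hcr2 with rfl | hcs
      · -- c = y
        have e1 : (p ++ x :: c :: s).idxOf c = p.length + 1 := by
          rw [List.idxOf_append_of_notMem hyp, List.idxOf_cons_ne _ hxy]
          simp
        have e2 : (p ++ c :: x :: s).idxOf c = p.length := idxOf_append_self hyp
        have r1 : (p ++ x :: c :: s).eraseIdx (p.length + 1) = p ++ x :: s := by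
          rw [List.eraseIdx_append_of_length_le (Nat.le_add_right _ _)]
          simp
        have r2 : (p ++ c :: x :: s).eraseIdx p.length = p ++ x :: s :=
          eraseIdx_append_self p (x :: s) c
        simp only [invSum, e1, e2, r1, r2]
        omega
      · -- c in the common suffix s
        rcases mem_decomp hcs with ⟨s1, s2, rfl, hcs1, _⟩
        have hcx : c ≠ x := by
          rintro rfl; simp at hnd2
        have hcy : c ≠ y := by
          rintro rfl
          have : (c :: s1 ++ c :: s2).Nodup := hnd2.of_cons
          simp at this
        have hcp' : c ∉ p := fun hcph => hdisj hcph hcr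
        have e0 : (s1 ++ c :: s2).idxOf c = s1.length := idxOf_append_self hcs1
        have e1 : (p ++ x :: y :: (s1 ++ c :: s2)).idxOf c = p.length + (s1.length + 2) := by
          rw [List.idxOf_append_of_notMem hcp', List.idxOf_cons_ne _ (Ne.symm hcx),
            List.idxOf_cons_ne _ (Ne.symm hcy), e0]
        have e2 : (p ++ y :: x :: (s1 ++ c :: s2)).idxOf c = p.length + (s1.length + 2) := by
          rw [List.idxOf_append_of_notMem hcp', List.idxOf_cons_ne _ (Ne.symm hcy),
            List.idxOf_cons_ne _ (Ne.symm hcx), e0]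
        have r0 : (s1 ++ c :: s2).eraseIdx s1.length = s1 ++ s2 := eraseIdx_append_self s1 s2 c
        have r1 : (p ++ x :: y :: (s1 ++ c :: s2)).eraseIdx (p.length + (s1.length + 2))
            = p ++ x :: y :: (s1 ++ s2) := by
          rw [List.eraseIdx_append_of_length_le (Nat.le_add_right _ _)]
          simp [List.eraseIdx_cons_succ, r0]
        have r2 : (p ++ y :: x :: (s1 ++ c :: s2)).eraseIdx (p.length + (s1.length + 2))
            = p ++ y :: x :: (s1 ++ s2) := by
          rw [List.eraseIdx_append_of_length_le (Nat.le_add_right _ _)]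
          simp [List.eraseIdx_cons_succ, r0]
        have hmid : (p ++ x :: y :: (s1 ++ c :: s2)).Perm (c :: (p ++ x :: y :: (s1 ++ s2))) := by
          have h1 := List.perm_middle (l₁ := p ++ x :: y :: s1) (a := c) (l₂ := s2)
          simpa [List.append_assoc] using h1
        have hperm' : cs.Perm (p ++ x :: y :: (s1 ++ s2)) := (hp.trans hmid).cons_inv
        have hnd' : (p ++ x :: y :: (s1 ++ s2)).Nodup := (List.Perm.nodup hmid hnd).of_cons
        have key := ih p (s1 ++ s2) x y hperm' hnd'
        simp only [invSum, e1, e2, r1, r2]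
        omega

def swaps : List Int → List Int → Nat
  | [], _ => 0
  | _ :: _, [] => 0
  | a :: as, b :: bs => if a = b then swaps as bs else swaps as (bs.set (bs.idxOf a) b) + 1

lemma moveFront (v : List Int) (p : List Int) : ∀ (s : List Int) (x : Int),
    v.Perm (p ++ x :: s) → (p ++ x :: s).Nodup →
    (invSum v (p ++ x :: s) + invSum v (x :: (p ++ s))) % 2 = p.length % 2 := by
  induction p using List.reverseRecOn with
  | nil => intro s x _ _; simp; omega
  | append_singleton p' y ih =>
    intro s x hp hnd
    have hass : (p' ++ [y]) ++ x :: s = p' ++ y :: x :: s := by simp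
    rw [hass] at hp hnd ⊢
    have hsw : (p' ++ y :: x :: s).Perm (p' ++ x :: y :: s) :=
      List.Perm.append_left p' (List.Perm.swap x y s)
    have hadj := adjSwap v p' s x y (hp.trans hsw) (List.Perm.nodup hsw hnd)
    have hih := ih (y :: s) x (hp.trans hsw) (List.Perm.nodup hsw hnd)
    have hass2 : (p' ++ [y]) ++ s = p' ++ y :: s := by simp
    rw [hass2]
    simp only [List.length_append, List.length_cons, List.length_nil] at *
    omega

lemma swaps_invSum (u : List Int) : ∀ (r : List Int), u.Perm r → r.Nodup →
    swaps u r % 2 = invSum u r % 2 := by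
  induction u with
  | nil => intro r _ _; simp [swaps, invSum]
  | cons a as ih =>
    intro r hp hnd
    cases r with
    | nil => exact absurd (List.perm_nil.mp hp) (by simp)
    | cons b bs =>
      by_cases hab : a = b
      · subst hab
        have h1 : (a :: bs).idxOf a = 0 := by simp
        simp only [swaps, invSum, h1, List.eraseIdx_zero, List.tail_cons, Nat.zero_add]
        exact ih bs hp.cons_inv hnd.of_cons
      · have ha : a ∈ bs := by
          rcases List.mem_cons.mp (hp.mem_iff.mp List.mem_cons_self) with h | h
          · exact absurd h hab
          · exact h
        rcases mem_decomp ha with ⟨s1, s2, rfl, hns1, hidx⟩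
        have hbd : b ∉ s1 ++ a :: s2 := hnd.notMem
        have hset : (s1 ++ a :: s2).set ((s1 ++ a :: s2).idxOf a) b = s1 ++ b :: s2 := by
          rw [hidx, List.set_append_right _ _ (le_refl _)]
          simp
        have e1 : (b :: (s1 ++ a :: s2)).idxOf a = s1.length + 1 := by
          rw [List.idxOf_cons_ne _ (fun e => hab e.symm), hidx]
        have r1 : (b :: (s1 ++ a :: s2)).eraseIdx (s1.length + 1) = b :: (s1 ++ s2) := by
          rw [List.eraseIdx_cons_succ, eraseIdx_append_self]
        have hperm' : as.Perm (s1 ++ b :: s2) := by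
          have h1 : (b :: (s1 ++ a :: s2)).Perm (a :: (b :: (s1 ++ s2))) := by
            have := List.perm_middle (l₁ := b :: s1) (a := a) (l₂ := s2)
            simpa using this
          have h2 : (s1 ++ b :: s2).Perm (b :: (s1 ++ s2)) := List.perm_middle
          exact ((hp.trans h1).cons_inv).trans h2.symm
        have hnd' : (s1 ++ b :: s2).Nodup := by
          have h2 : (s1 ++ b :: s2).Perm (b :: (s1 ++ s2)) := List.perm_middle
          have : (s1 ++ s2).Nodup := by
            have := hnd.of_cons
            have h3 : (s1 ++ a :: s2).Perm (a :: (s1 ++ s2)) := List.perm_middle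
            exact (List.Perm.nodup h3 this).of_cons
          refine h2.symm.nodup ?_
          simp only [List.nodup_cons]
          exact ⟨fun hm => hbd (by simp [List.mem_append] at hm ⊢; tauto), this⟩
        have hmove := moveFront as s1 s2 b hperm' hnd'
        have hih := ih (s1 ++ b :: s2) hperm' hnd'
        simp only [swaps, if_neg hab, hset, invSum, e1, r1]
        omega

lemma idxOf_unchanged (P s1 s2 : List Int) (a b v : Int) (hva : v ≠ a) (hvb : v ≠ b) :
    (P ++ b :: (s1 ++ a :: s2)).idxOf v = (P ++ a :: (s1 ++ b :: s2)).idxOf v := by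
  by_cases hvP : v ∈ P
  · rw [List.idxOf_append_of_mem hvP, List.idxOf_append_of_mem hvP]
  · rw [List.idxOf_append_of_notMem hvP, List.idxOf_append_of_notMem hvP,
      List.idxOf_cons_ne _ (Ne.symm hvb), List.idxOf_cons_ne _ (Ne.symm hva)]
    by_cases hvs1 : v ∈ s1
    · rw [List.idxOf_append_of_mem hvs1, List.idxOf_append_of_mem hvs1]
    · rw [List.idxOf_append_of_notMem hvs1, List.idxOf_append_of_notMem hvs1,
        List.idxOf_cons_ne _ (Ne.symm hva), List.idxOf_cons_ne _ (Ne.symm hvb)]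

lemma aLoop (u : List Int) : ∀ (P r : List Int) (m : PySem.Dict Int Int) (c : Int),
    u.Perm r → (P ++ r).Nodup →
    (∀ v ∈ P ++ r, m.getD v 0 = ((P ++ r).idxOf v : Int)) →
    ((PySem.List.enumerate u (P.length : Int)).foldl
      (fun st iv =>
        let loc := iv.1
        let p0 := iv.2
        let p1 := (PySem.List.pyGet? st.1 loc).getD 0
        if p0 ≠ p1 then
          let sloc := st.2.1.getD p0 0
          (PySem.List.pySetD (PySem.List.pySetD st.1 loc p0) sloc p1,
           (st.2.1.insert p0 loc).insert p1 sloc,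
           st.2.2 + 1)
        else st)
      (P ++ r, m, c)).2.2 = c + (swaps u r : Int) := by
  induction u with
  | nil =>
    intro P r m c _ _ _
    simp [PySem.List.enumerate_nil, swaps]
  | cons a as ih =>
    intro P r m c hp hnd hm
    cases r with
    | nil => exact absurd (List.perm_nil.mp hp) (by simp)
    | cons b bs =>
      rw [PySem.List.enumerate_cons, List.foldl_cons]
      have hget : PySem.List.pyGet? (P ++ b :: bs) (P.length : Int) = some b :=
        PySem.List.pyGet?_append_length P bs b
      simp only [ne_eq] at ih ⊢
      by_cases hab : a = b
      · -- matching heads: the state is untouched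
        subst hab
        simp only [hget, Option.getD_some, not_true_eq_false, if_false]
        have hP' : ((P.length : Int) + 1) = (((P ++ [a]).length : Nat) : Int) := by simp
        have hL' : P ++ a :: bs = (P ++ [a]) ++ bs := by simp
        rw [hP', hL']
        rw [ih (P ++ [a]) bs m c hp.cons_inv (by rw [← hL']; exact hnd)
          (by rw [← hL']; exact hm)]
        simp [swaps]
      · -- mismatch: one swap in the list and in the map
        have hmemr : a ∈ b :: bs := hp.mem_iff.mp List.mem_cons_self
        have habs : a ∈ bs := by
          rcases List.mem_cons.mp hmemr with h | h
          · exact absurd h hab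
          · exact h
        rcases mem_decomp habs with ⟨s1, s2, hbs, hns1, hidx⟩
        subst hbs
        have hdisj := List.disjoint_of_nodup_append hnd
        have haP : a ∉ P := fun h => hdisj h hmemr
        have hbP : b ∉ P := fun h => hdisj h List.mem_cons_self
        have hndr : (b :: (s1 ++ a :: s2)).Nodup := (List.nodup_append.mp hnd).2.1
        have hbbs : b ∉ s1 ++ a :: s2 := hndr.notMem
        have hba : b ≠ a := fun e => hbbs (e ▸ habs)
        have hbs1 : b ∉ s1 := fun h => hbbs (List.mem_append.mpr (Or.inl h))
        have hidxa : (P ++ b :: (s1 ++ a :: s2)).idxOf a = P.length + (s1.length + 1) := by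
          rw [List.idxOf_append_of_notMem haP, List.idxOf_cons_ne _ hba, hidx]
        have hma : m.getD a 0 = ((P.length + (s1.length + 1) : Nat) : Int) := by
          rw [hm a (List.mem_append.mpr (Or.inr hmemr)), hidxa]
        have hset1 : (P ++ b :: (s1 ++ a :: s2)).set P.length a = P ++ a :: (s1 ++ a :: s2) := by
          rw [List.set_append_right _ _ (le_refl _)]
          simp
        have hset2 : (P ++ a :: (s1 ++ a :: s2)).set (P.length + (s1.length + 1)) b
            = P ++ a :: (s1 ++ b :: s2) := by
          rw [List.set_append_right _ _ (Nat.le_add_right _ _), Nat.add_sub_cancel_left]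
          have h0 : (s1 ++ a :: s2).set s1.length b = s1 ++ b :: s2 := by
            rw [List.set_append_right _ _ (le_refl _)]
            simp
          simp [h0]
        have e1 : PySem.List.pySetD (P ++ b :: (s1 ++ a :: s2)) (P.length : Int) a
            = P ++ a :: (s1 ++ a :: s2) := by
          rw [PySem.List.pySetD_natCast, hset1]
        have e2 : PySem.List.pySetD (P ++ a :: (s1 ++ a :: s2))
              ((P.length + (s1.length + 1) : Nat) : Int) b = P ++ a :: (s1 ++ b :: s2) := by
          rw [PySem.List.pySetD_natCast, hset2]
        simp only [hget, Option.getD_some, hma, hab, not_false_eq_true, if_true, e1, e2]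
        -- permutation bookkeeping
        have h1 : (b :: (s1 ++ a :: s2)).Perm (a :: (b :: (s1 ++ s2))) := by
          have := List.perm_middle (l₁ := b :: s1) (a := a) (l₂ := s2)
          simpa using this
        have h2 : (s1 ++ b :: s2).Perm (b :: (s1 ++ s2)) := List.perm_middle
        have hperm' : as.Perm (s1 ++ b :: s2) := ((hp.trans h1).cons_inv).trans h2.symm
        have hinner : (b :: (s1 ++ a :: s2)).Perm (a :: (s1 ++ b :: s2)) :=
          h1.trans (List.Perm.cons a h2).symm
        have hndL' : (P ++ a :: (s1 ++ b :: s2)).Nodup :=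
          (List.Perm.append_left P hinner).nodup hnd
        -- the updated map is the index map of the updated list
        have hm' : ∀ v ∈ P ++ a :: (s1 ++ b :: s2),
            ((m.insert a (P.length : Int)).insert b
                ((P.length + (s1.length + 1) : Nat) : Int)).getD v 0
              = ((P ++ a :: (s1 ++ b :: s2)).idxOf v : Int) := by
          intro v hv
          by_cases hvb : v = b
          · subst hvb
            rw [PySem.Dict.getD_insert_self]
            rw [List.idxOf_append_of_notMem hbP, List.idxOf_cons_ne _ (Ne.symm hba),
              idxOf_append_self hbs1]
          · rw [PySem.Dict.getD_insert_of_ne _ _ _ hvb]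
            by_cases hva : v = a
            · subst hva
              rw [PySem.Dict.getD_insert_self]
              rw [idxOf_append_self haP]
            · rw [PySem.Dict.getD_insert_of_ne _ _ _ hva]
              have hvL : v ∈ P ++ b :: (s1 ++ a :: s2) :=
                (List.Perm.append_left P hinner).mem_iff.mpr hv
              rw [hm v hvL, idxOf_unchanged P s1 s2 a b v hva hvb]
        have hP' : ((P.length : Int) + 1) = (((P ++ [a]).length : Nat) : Int) := by simp
        have hL' : P ++ a :: (s1 ++ b :: s2) = (P ++ [a]) ++ (s1 ++ b :: s2) := by simp
        rw [hP', hL']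
        rw [ih (P ++ [a]) (s1 ++ b :: s2) _ (c + 1) hperm'
          (by rw [← hL']; exact hndL') (by rw [← hL']; exact hm')]
        have hsw : swaps (a :: as) (b :: (s1 ++ a :: s2))
            = swaps as (s1 ++ b :: s2) + 1 := by
          have hset : (s1 ++ a :: s2).set ((s1 ++ a :: s2).idxOf a) b = s1 ++ b :: s2 := by
            rw [hidx, List.set_append_right _ _ (le_refl _)]
            simp
          simp [swaps, hab, hset]
        rw [hsw]
        push_cast; ring

lemma aLoopEq (u : List Int) : ∀ (P : List Int) (m : PySem.Dict Int Int) (c : Int),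
    ((PySem.List.enumerate u (P.length : Int)).foldl
      (fun st iv =>
        let loc := iv.1
        let p0 := iv.2
        let p1 := (PySem.List.pyGet? st.1 loc).getD 0
        if p0 ≠ p1 then
          let sloc := st.2.1.getD p0 0
          (PySem.List.pySetD (PySem.List.pySetD st.1 loc p0) sloc p1,
           (st.2.1.insert p0 loc).insert p1 sloc,
           st.2.2 + 1)
        else st)
      (P ++ u, m, c)).2.2 = c := by
  induction u with
  | nil =>
    intro P m c
    simp [PySem.List.enumerate_nil]
  | cons a as ih =>
    intro P m c
    rw [PySem.List.enumerate_cons, List.foldl_cons]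
    have hget : PySem.List.pyGet? (P ++ a :: as) (P.length : Int) = some a :=
      PySem.List.pyGet?_append_length P as a
    simp only [ne_eq] at ih ⊢
    simp only [hget, Option.getD_some, not_true_eq_false, if_false]
    have hP' : ((P.length : Int) + 1) = (((P ++ [a]).length : Nat) : Int) := by simp
    have hL' : P ++ a :: as = (P ++ [a]) ++ as := by simp
    rw [hP', hL', ih (P ++ [a]) m c]

lemma bLoopEq (u : List Int) : ∀ (inv : Int),
    (u.foldl
      (fun st a =>
        let k := (PySem.List.index? st.1 a).getD 0
        (((PySem.List.pop? st.1 (k : Int)).getD (0, st.1)).2, st.2 + (k : Int)))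
      (u, inv)).2 = inv := by
  induction u with
  | nil => intro inv; simp
  | cons a as ih =>
    intro inv
    rw [List.foldl_cons]
    have hidx : PySem.List.index? (a :: as) a = some 0 := PySem.List.index?_cons_self a as
    have hpop : PySem.List.pop? (a :: as) (((0 : Nat) : Nat) : Int) = some (a, as) := by
      simp [PySem.List.pop?_zero_cons]
    simp only [hidx, Option.getD_some, hpop]
    simpa using ih (inv + ((0 : Nat) : Int))

-- ===== VERDICT (by name: the statement is the Claim_ definition above) =====
theorem arePermsEqualParity_spec : Claim_equal_arePermsEqualParity := by
  intro perm0 perm1 _ hpre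
  unfold Spec_arePermsEqualParity
  simp only [arePermsEqualParity, arePermsEqualParity_alt]
  rcases hpre with ⟨hnd, hp⟩ | rfl | rfl
  case inr.inr =>
    -- perm0 = []: both loops are empty; both return 1
    simp [PySem.List.enumerate_nil]
  case inr.inl =>
    -- elementwise-equal lists: neither loop changes anything; both return 1
    have hA := aLoopEq perm0 []
      ((PySem.List.enumerate perm0).foldl (fun d iv => d.insert iv.2 iv.1) PySem.Dict.empty) 0
    simp only [List.length_nil, Nat.cast_zero, List.nil_append] at hA
    have hB := bLoopEq perm0 0
    rw [hA, hB]
  case inl =>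
    have hndP : (([] : List Int) ++ perm1).Nodup := by simpa using hnd
    have hm0 : ∀ v ∈ ([] : List Int) ++ perm1,
        ((PySem.List.enumerate perm1).foldl (fun d iv => d.insert iv.2 iv.1)
          PySem.Dict.empty).getD v 0 = ((([] : List Int) ++ perm1).idxOf v : Int) := by
      intro v hv
      have hv' : v ∈ perm1 := by simpa using hv
      have := buildMap perm1 0 PySem.Dict.empty v hnd hv'
      simpa using this
    have hA := aLoop perm0 [] perm1
      ((PySem.List.enumerate perm1).foldl (fun d iv => d.insert iv.2 iv.1) PySem.Dict.empty)
      0 hp hndP hm0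
    simp only [List.length_nil, Nat.cast_zero, List.nil_append, zero_add] at hA
    have hB := bLoop perm0 perm1 0 hp
    simp only [zero_add] at hB
    rw [hA, hB]
    have hparity := swaps_invSum perm0 perm1 hp hnd
    have hmods : PySem.Int.mod ((swaps perm0 perm1 : Nat) : Int) 2
        = PySem.Int.mod ((invSum perm0 perm1 : Nat) : Int) 2 := by
      rw [PySem.Int.mod_eq_emod_of_pos (by norm_num), PySem.Int.mod_eq_emod_of_pos (by norm_num)]
      omega
    rw [hmods]
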